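-- pv_equiv track=rewrite | github.com/gali1998/ExtendedIntroToCSHomework | 3/idan.py | idan_int_to_string
-- ===== SOURCE A (Python) =====
-- def idan_int_to_string(k, n):
--     assert 0 <= n <= 5 ** k - 1
--     values_dict = {0: 'a', 1: 'b', 2: 'c', 3: 'd', 4: 'e'}
--     str = ''
--     for i in range(k):
--         str = values_dict[n%5] + str
--         n = n//5
--     return str
-- ===== SOURCE B (Python) =====
-- def idan_int_to_string(k, n):
--     assert 0 <= n <= 5 ** k - 1
--     values_dict = {0: 'a', 1: 'b', 2: 'c', 3: 'd', 4: 'e'}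
--
--     def convert(m, x):
--         # m-digit base-5 rendering of x, by divide and conquer
--         if m == 1:
--             return values_dict[x]
--         half = m // 2
--         high, low = divmod(x, 5 ** half)
--         return convert(m - half, high) + convert(half, low)
--
--     if k == 0:
--         return ''
--     return convert(k, n)
-- ===== Notes on version B (the rewrite author's own statement) =====
-- stated objective: faster
-- what changed: B renders the k base-5 digits by divide and conquer (split n with one divmod by 5**(k//2), recurse on both halves, concatenate), instead of A's digit-at-a-time running-quotient loop that prepends one character per division by 5.
import Mathlib
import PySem

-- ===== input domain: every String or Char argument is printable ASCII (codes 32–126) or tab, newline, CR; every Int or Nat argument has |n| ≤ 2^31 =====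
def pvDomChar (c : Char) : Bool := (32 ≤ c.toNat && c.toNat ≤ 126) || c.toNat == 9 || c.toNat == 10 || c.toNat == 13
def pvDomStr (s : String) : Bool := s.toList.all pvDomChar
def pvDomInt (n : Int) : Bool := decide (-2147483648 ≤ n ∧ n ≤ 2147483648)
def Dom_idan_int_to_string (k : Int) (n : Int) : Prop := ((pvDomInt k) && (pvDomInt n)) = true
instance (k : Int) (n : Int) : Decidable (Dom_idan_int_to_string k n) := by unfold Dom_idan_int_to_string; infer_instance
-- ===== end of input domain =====

-- B renders the k base-5 digits by divide and conquer on the digit count (one divmod by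
-- 5**(k//2) per split) instead of A's digit-at-a-time running-quotient loop with string prepending.


-- ===== PORT A =====
-- values_dict = {0:'a', 1:'b', 2:'c', 3:'d', 4:'e'}
def pvValuesA : PySem.Dict Int String :=
  PySem.Dict.ofList [(0, "a"), (1, "b"), (2, "c"), (3, "d"), (4, "e")]

-- values_dict[n % 5]: the key n % 5 is always in 0..4 (floor mod, positive divisor),
-- hence always present, so getD with a dummy default is exact.
def idan_int_to_string (k : Int) (n : Int) : String :=
  ((PySem.List.pyRange 0 k 1).foldl
    (fun (st : String × Int) _ =>
      (PySem.Dict.getD pvValuesA (PySem.Int.mod st.2 5) "" ++ st.1,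
       PySem.Int.floordiv st.2 5))
    ("", n)).1

-- ===== PORT B =====
def pvValuesB : PySem.Dict Int String :=
  PySem.Dict.ofList [(0, "a"), (1, "b"), (2, "c"), (3, "d"), (4, "e")]

-- B's inner 'convert(m, x)'. Python's base case is 'm == 1'; convert is only ever called
-- with m ≥ 1 (k ≥ 1 at the top, then halves ≥ 1), so folding the unreachable m ≤ 0 (where
-- Python would recurse forever) into the base case keeps the port exact on every reachable
-- call.  values_dict[x] is exact via getD: every x passed in lies in 0..4 (see pvConvert_eq).
def pvConvert (m : Int) (x : Int) : String :=
  if m ≤ 1 then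
    PySem.Dict.getD pvValuesB x ""
  else
    let half := PySem.Int.floordiv m 2
    let p := (5 : Int) ^ half.toNat     -- 5 ** half (half ≥ 1 here, so Python's ** is integer power)
    pvConvert (m - half) (PySem.Int.floordiv x p) ++ pvConvert half (PySem.Int.mod x p)
termination_by m.toNat
decreasing_by
  all_goals
    have h2 : PySem.Int.floordiv m 2 = m / 2 := PySem.Int.floordiv_eq_ediv_of_pos (by norm_num)
    rw [h2]; omega

def idan_int_to_string_alt (k : Int) (n : Int) : String :=
  if k = 0 then "" else pvConvert k n

-- ===== PRECONDITION & SPEC =====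
-- A's assert raises unless 0 <= n <= 5**k - 1 (for k < 0, 5**k is a float < 1, so the
-- assert always fails); Pre_ admits exactly the inputs where the assert passes: on Dom
-- (|n| ≤ 2^31 < 5^14) the disjunct '14 ≤ k' is equivalent to 'n < 5^k' there, so Pre_
-- excludes no input A returns on — the form merely avoids evaluating astronomical powers.
def Pre_idan_int_to_string (k : Int) (n : Int) : Prop :=
  0 ≤ k ∧ 0 ≤ n ∧ (14 ≤ k ∨ n < (5 : Int) ^ k.toNat)
instance (k : Int) (n : Int) : Decidable (Pre_idan_int_to_string k n) := by
  unfold Pre_idan_int_to_string; infer_instance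
def pvWitness_idan_int_to_string : Int × Int := (3, 117)

def Spec_idan_int_to_string (k : Int) (n : Int) (out : String) : Prop := out = idan_int_to_string_alt k n
instance (k : Int) (n : Int) (out : String) : Decidable (Spec_idan_int_to_string k n out) := by unfold Spec_idan_int_to_string; infer_instance

-- ===== CLAIM (what is proved, stated in full; the proofs are below) =====
def Claim_equal_idan_int_to_string : Prop := ∀ (k : Int) (n : Int), Dom_idan_int_to_string k n → Pre_idan_int_to_string k n → Spec_idan_int_to_string k n (idan_int_to_string k n)

-- ===== LEMMAS AND PROOFS =====

-- the character both programs pick for one digit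
def pvDigitChar (x : Int) : String := PySem.Dict.getD pvValuesA x ""

-- the digit string A's loop produces: pvAux m n = base-5 digits m-1 .. 0 of n, msb first
def pvAux : Nat → Int → String
  | 0, _ => ""
  | m + 1, n => pvAux m (PySem.Int.floordiv n 5) ++ pvDigitChar (PySem.Int.mod n 5)

theorem pvFloordiv_floordiv (a : Int) (e : Nat) :
    PySem.Int.floordiv (PySem.Int.floordiv a 5) ((5 : Int) ^ e) =
      PySem.Int.floordiv a ((5 : Int) ^ (e + 1)) := by
  rw [PySem.Int.floordiv_eq_ediv_of_pos (b := 5) (by norm_num),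
      PySem.Int.floordiv_eq_ediv_of_pos (by positivity),
      PySem.Int.floordiv_eq_ediv_of_pos (by positivity),
      Int.ediv_ediv_of_nonneg (by norm_num)]
  ring_nf

theorem pvMod_mod (x : Int) (b : Nat) :
    PySem.Int.mod (PySem.Int.mod x ((5 : Int) ^ (b + 1))) 5 = PySem.Int.mod x 5 := by
  rw [PySem.Int.mod_eq_emod_of_pos (a := PySem.Int.mod x ((5:Int) ^ (b+1))) (by norm_num),
      PySem.Int.mod_eq_emod_of_pos (a := x) (b := (5:Int) ^ (b+1)) (by positivity),
      PySem.Int.mod_eq_emod_of_pos (a := x) (b := 5) (by norm_num)]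
  exact Int.emod_emod_of_dvd x (dvd_pow_self 5 (Nat.succ_ne_zero b))

theorem pvMod_div (x : Int) (b : Nat) :
    PySem.Int.floordiv (PySem.Int.mod x ((5 : Int) ^ (b + 1))) 5 =
      PySem.Int.mod (PySem.Int.floordiv x 5) ((5 : Int) ^ b) := by
  have hp : (0 : Int) < 5 ^ b := by positivity
  rw [PySem.Int.mod_eq_emod_of_pos (by positivity),
      PySem.Int.mod_eq_emod_of_pos hp,
      PySem.Int.floordiv_eq_ediv_of_pos (b := 5) (by norm_num),
      PySem.Int.floordiv_eq_ediv_of_pos (b := 5) (by norm_num)]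
  set p : Int := 5 ^ b with hpdef
  have h51 : (5 : Int) ^ (b + 1) = 5 * p := by rw [hpdef]; ring
  rw [h51]
  have h5p : (0 : Int) < 5 * p := by positivity
  set q : Int := x / (5 * p) with hq
  set r : Int := x % (5 * p) with hr
  have hr0 : 0 ≤ r := Int.emod_nonneg x (by omega)
  have hr1 : r < 5 * p := Int.emod_lt_of_pos x h5p
  have hx : x = r + (p * q) * 5 := by rw [hr, hq]; have := Int.mul_ediv_add_emod x (5 * p); ring_nf; ring_nf at this; omega
  have hdiv : x / 5 = r / 5 + p * q := by
    rw [hx, Int.add_mul_ediv_right _ _ (by norm_num : (5:Int) ≠ 0)]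
  rw [hdiv, Int.add_mul_emod_self_left]
  have hq0 : 0 ≤ r / 5 := by omega
  have hq1 : r / 5 < p := by omega
  exact (Int.emod_eq_of_lt hq0 hq1).symm

theorem pvAux_add (b a : Nat) (x : Int) :
    pvAux (a + b) x =
      pvAux a (PySem.Int.floordiv x ((5 : Int) ^ b)) ++
        pvAux b (PySem.Int.mod x ((5 : Int) ^ b)) := by
  induction b generalizing x with
  | zero => simp [pvAux, String.append_empty]
  | succ b ih =>
    show pvAux ((a + b) + 1) x = _
    rw [show pvAux ((a + b) + 1) x =
          pvAux (a + b) (PySem.Int.floordiv x 5) ++ pvDigitChar (PySem.Int.mod x 5) from rfl,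
        ih (PySem.Int.floordiv x 5),
        show pvAux (b + 1) (PySem.Int.mod x ((5 : Int) ^ (b + 1))) =
          pvAux b (PySem.Int.floordiv (PySem.Int.mod x ((5 : Int) ^ (b + 1))) 5) ++
            pvDigitChar (PySem.Int.mod (PySem.Int.mod x ((5 : Int) ^ (b + 1))) 5) from rfl,
        pvMod_div, pvMod_mod, pvFloordiv_floordiv, String.append_assoc]

theorem pvConvert_eq (m : Nat) (x : Int) (h1 : 1 ≤ m) (h0 : 0 ≤ x)
    (hx : x < (5 : Int) ^ m) : pvConvert (m : Int) x = pvAux m x := by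
  induction m using Nat.strong_induction_on generalizing x with
  | _ m ih =>
    rw [pvConvert]
    by_cases hm : m = 1
    · subst hm
      rw [if_pos (by norm_num)]
      show pvValuesB.getD x "" = pvAux 0 (PySem.Int.floordiv x 5) ++ pvDigitChar (PySem.Int.mod x 5)
      rw [PySem.Int.mod_eq_emod_of_pos (by norm_num),
          Int.emod_eq_of_lt h0 (by simpa using hx)]
      simp [pvAux, pvDigitChar, pvValuesB, pvValuesA]
    · have hm2 : 2 ≤ m := by omega
      rw [if_neg (by exact_mod_cast (by omega : ¬ ((m : Int) ≤ 1)))]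
      have hhalf : PySem.Int.floordiv (m : Int) 2 = ((m / 2 : Nat) : Int) := by
        rw [PySem.Int.floordiv_eq_ediv_of_pos (by norm_num)]
        omega
      set b : Nat := m / 2 with hb
      set a : Nat := m - b with ha
      have hab : a + b = m := by omega
      have ha1 : 1 ≤ a := by omega
      have hb1 : 1 ≤ b := by omega
      have hcast1 : (m : Int) - ((b : Nat) : Int) = ((a : Nat) : Int) := by omega
      have htn : (((b : Nat) : Int)).toNat = b := by simp
      rw [hhalf]
      show pvConvert ((m : Int) - ((b : Nat) : Int))
            (PySem.Int.floordiv x ((5:Int) ^ (((b : Nat) : Int)).toNat)) ++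
          pvConvert ((b : Nat) : Int)
            (PySem.Int.mod x ((5:Int) ^ (((b : Nat) : Int)).toNat)) = pvAux m x
      rw [hcast1, htn]
      have hpow : (5 : Int) ^ m = 5 ^ a * 5 ^ b := by rw [← hab]; ring
      have hlow0 : 0 ≤ PySem.Int.mod x ((5:Int) ^ b) := by
        rw [PySem.Int.mod_eq_emod_of_pos (by positivity)]
        exact Int.emod_nonneg x (by positivity)
      have hlow1 : PySem.Int.mod x ((5:Int) ^ b) < 5 ^ b := by
        rw [PySem.Int.mod_eq_emod_of_pos (by positivity)]
        exact Int.emod_lt_of_pos x (by positivity)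
      have hhigh0 : 0 ≤ PySem.Int.floordiv x ((5:Int) ^ b) := by
        rw [PySem.Int.floordiv_eq_ediv_of_pos (by positivity)]
        exact Int.ediv_nonneg h0 (by positivity)
      have hhigh1 : PySem.Int.floordiv x ((5:Int) ^ b) < 5 ^ a := by
        rw [PySem.Int.floordiv_eq_ediv_of_pos (by positivity)]
        exact (Int.ediv_lt_iff_lt_mul (by positivity)).mpr (by rw [← hpow]; exact hx)
      rw [ih a (by omega) _ ha1 hhigh0 hhigh1, ih b (by omega) _ hb1 hlow0 hlow1,
          ← hab, pvAux_add b a x]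

theorem pvA_loop (l : List Int) (s : String) (n : Int) :
    (l.foldl
      (fun (st : String × Int) _ =>
        (PySem.Dict.getD pvValuesA (PySem.Int.mod st.2 5) "" ++ st.1,
         PySem.Int.floordiv st.2 5)) (s, n)).1 = pvAux l.length n ++ s := by
  induction l generalizing s n with
  | nil => simp [pvAux]
  | cons _ t ih =>
    simp only [List.foldl_cons, List.length_cons, ih]
    show pvAux t.length (PySem.Int.floordiv n 5) ++ (pvDigitChar (PySem.Int.mod n 5) ++ s) = _
    rw [← String.append_assoc]
    rfl

-- ===== VERDICT (by name: the statement is the Claim_ definition above) =====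
theorem idan_int_to_string_spec : Claim_equal_idan_int_to_string := by
  intro k n hdom hpre
  obtain ⟨hk, hn0, hnb⟩ := hpre
  unfold Spec_idan_int_to_string idan_int_to_string idan_int_to_string_alt
  have hnk : n < (5 : Int) ^ k.toNat := by
    rcases hnb with h14 | hlt
    · have hnle : n ≤ 2147483648 := by
        have := hdom
        unfold Dom_idan_int_to_string pvDomInt at this
        simp only [Bool.and_eq_true, decide_eq_true_eq] at this
        exact this.2.2
      calc n ≤ 2147483648 := hnle
        _ < (5 : Int) ^ 14 := by norm_num
        _ ≤ (5 : Int) ^ k.toNat := pow_le_pow_right₀ (by norm_num) (by omega)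
    · exact hlt
  by_cases h0 : k = 0
  · subst h0
    rw [if_pos rfl, PySem.List.pyRange_one_eq_nil le_rfl]
    rfl
  · rw [if_neg h0]
    have hkn : k = (k.toNat : Int) := (Int.toNat_of_nonneg hk).symm
    rw [hkn, pvA_loop, PySem.List.length_pyRange_one,
        show (((k.toNat : Int)) - 0).toNat = k.toNat by omega,
        pvConvert_eq k.toNat n (by omega) hn0 hnk]
    exact String.append_empty
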